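-- pv_equiv track=rewrite | github.com/MadJayhawk/codeforcesproblems | 0461 A - Appleman and Toastman.py | appleman_and_toastman
-- ===== SOURCE A (Python) =====
-- def appleman_and_toastman(n, a):
--     b = sorted(a)
--     s = sum(b)
--     t = s
--     if n > 1:
--         for i in range(n - 1):
--             t += b[i]
--             s -= b[i]
--             t += s
--     return t
-- ===== SOURCE B (Python) =====
-- def appleman_and_toastman(n, a):
--     # Closed-form positional weights instead of A's dual running-sum loop.
--     b = sorted(a)
--     s = sum(b)
--     if n <= 1:
--         return s
--     m = n - 1
--     return s * n + sum(b[j] * (j + 1 - m) for j in range(m))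
-- ===== Notes on version B (the rewrite author's own statement) =====
-- stated objective: simpler
-- what changed: Replaces A's loop maintaining two running accumulators (total t and shrinking suffix sum s) by a single closed-form weighted sum: sum(b)*n plus each of the first n-1 sorted elements times its positional weight (j+1-(n-1)).
import Mathlib
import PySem

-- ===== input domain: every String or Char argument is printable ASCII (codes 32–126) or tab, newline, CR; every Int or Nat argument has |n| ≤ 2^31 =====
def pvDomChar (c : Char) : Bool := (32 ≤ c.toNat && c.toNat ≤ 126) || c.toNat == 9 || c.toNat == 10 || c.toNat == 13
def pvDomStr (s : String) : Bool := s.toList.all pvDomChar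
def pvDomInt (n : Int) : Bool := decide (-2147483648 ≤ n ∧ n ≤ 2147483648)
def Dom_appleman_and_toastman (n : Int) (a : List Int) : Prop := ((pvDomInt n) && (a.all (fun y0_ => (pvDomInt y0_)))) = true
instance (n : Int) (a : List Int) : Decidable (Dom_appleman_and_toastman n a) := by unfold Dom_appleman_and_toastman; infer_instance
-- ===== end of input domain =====

-- B replaces A's dual running-sum loop (t and shrinking s) by direct positional weights
-- summed in one closed-form pass (objective: simpler).

-- ===== PORT A =====
-- b[i] is ported with pyGetD; Pre_ keeps every accessed index in range (Python raises otherwise).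
def appleman_and_toastman (n : Int) (a : List Int) : Int :=
  let b := PySem.List.sorted a (fun x => x) false
  let s := b.foldl (· + ·) 0
  let t := s
  let p :=
    if n > 1 then
      (PySem.List.pyRange 0 (n - 1) 1).foldl
        (fun (ts : Int × Int) i =>
          let t1 := ts.1 + PySem.List.pyGetD b i 0
          let s1 := ts.2 - PySem.List.pyGetD b i 0
          (t1 + s1, s1)) (t, s)
    else (t, s)
  p.1

-- ===== PORT B =====
def appleman_and_toastman_alt (n : Int) (a : List Int) : Int :=
  let b := PySem.List.sorted a (fun x => x) false
  let s := b.foldl (· + ·) 0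
  if n ≤ 1 then s
  else
    let m := n - 1
    s * n + (PySem.List.pyRange 0 m 1).foldl
      (fun acc j => acc + PySem.List.pyGetD b j 0 * (j + 1 - m)) 0

-- ===== PRECONDITION & SPEC =====
-- Pre_ excludes exactly the inputs where Python A raises IndexError (b[i] with i ≥ len(a)).
def Pre_appleman_and_toastman (n : Int) (a : List Int) : Prop := n ≤ (a.length : Int) + 1
instance (n : Int) (a : List Int) : Decidable (Pre_appleman_and_toastman n a) := by unfold Pre_appleman_and_toastman; infer_instance
def pvWitness_appleman_and_toastman : Int × List Int := (3, [3, 1, 5])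

def Spec_appleman_and_toastman (n : Int) (a : List Int) (out : Int) : Prop := out = appleman_and_toastman_alt n a
instance (n : Int) (a : List Int) (out : Int) : Decidable (Spec_appleman_and_toastman n a out) := by unfold Spec_appleman_and_toastman; infer_instance

-- ===== CLAIM (what is proved, stated in full; the proofs are below) =====
def Claim_equal_appleman_and_toastman : Prop := ∀ (n : Int) (a : List Int), Dom_appleman_and_toastman n a → Pre_appleman_and_toastman n a → Spec_appleman_and_toastman n a (appleman_and_toastman n a)

-- ===== LEMMAS AND PROOFS =====

-- prefix sum of the first k defaults-to-0 entries
def pvP (b : List Int) (k : Nat) : Int := ∑ j ∈ Finset.range k, b.getD j 0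

-- weighted sum Σ_{j<k} b[j]·(j+1-k)
def pvW (b : List Int) (k : Nat) : Int :=
  ∑ j ∈ Finset.range k, b.getD j 0 * ((j : Int) + 1 - (k : Int))

theorem pvW_succ (b : List Int) (k : Nat) : pvW b (k + 1) = pvW b k - pvP b k := by
  simp only [pvW, pvP, Finset.sum_range_succ, ← Finset.sum_sub_distrib]
  push_cast
  have h : ∀ j ∈ Finset.range k,
      b.getD j 0 * ((j : Int) + 1 - ((k : Int) + 1))
        = b.getD j 0 * ((j : Int) + 1 - (k : Int)) - b.getD j 0 := by
    intro j _; ring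
  rw [Finset.sum_congr rfl h]; ring

theorem pvP_succ (b : List Int) (k : Nat) : pvP b (k + 1) = pvP b k + b.getD k 0 := by
  simp [pvP, Finset.sum_range_succ]

-- closed form of A's dual running-sum fold
theorem afold (b : List Int) (s0 : Int) (k : Nat) :
    (PySem.List.pyRange 0 (k : Int) 1).foldl
        (fun (ts : Int × Int) i =>
          let t1 := ts.1 + PySem.List.pyGetD b i 0
          let s1 := ts.2 - PySem.List.pyGetD b i 0
          (t1 + s1, s1)) (s0, s0)
      = (s0 * ((k : Int) + 1) + pvW b k, s0 - pvP b k) := by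
  induction k with
  | zero => simp [PySem.List.pyRange_one_eq_nil, pvW, pvP]
  | succ k ih =>
    have hb : ((k + 1 : Nat) : Int) = (k : Int) + 1 := by push_cast; ring
    rw [hb, PySem.List.pyRange_one_succ_right (by positivity), List.foldl_append, ih]
    simp only [List.foldl_cons, List.foldl_nil, PySem.List.pyGetD_natCast, pvW_succ, pvP_succ]
    exact Prod.ext (by ring) (by ring)

-- closed form of B's single accumulating fold
theorem bfold (f : Int → Int) (k : Nat) (c : Int) :
    (PySem.List.pyRange 0 (k : Int) 1).foldl (fun acc j => acc + f j) c
      = c + ∑ j ∈ Finset.range k, f (j : Int) := by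
  induction k generalizing c with
  | zero => simp [PySem.List.pyRange_one_eq_nil]
  | succ k ih =>
    have hb : ((k + 1 : Nat) : Int) = (k : Int) + 1 := by push_cast; ring
    rw [hb, PySem.List.pyRange_one_succ_right (by positivity), List.foldl_append, ih]
    rw [Finset.sum_range_succ]
    simp only [List.foldl_cons, List.foldl_nil]; ring

-- ===== VERDICT (by name: the statement is the Claim_ definition above) =====
theorem appleman_and_toastman_spec : Claim_equal_appleman_and_toastman := by
  intro n a _ _
  unfold Spec_appleman_and_toastman appleman_and_toastman appleman_and_toastman_alt
  by_cases h : n ≤ 1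
  · simp [h, not_lt.mpr h]
  · rw [not_le] at h
    simp only [if_pos h, if_neg (not_le.mpr h)]
    set b := PySem.List.sorted a (fun x => x) false with hbdef
    set s := b.foldl (· + ·) 0 with hsdef
    have hk : ((n - 1).toNat : Int) = n - 1 := by omega
    rw [← hk, afold, bfold]
    simp only [pvW, PySem.List.pyGetD_natCast]
    rw [hk]; ring
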